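-- pv_equiv track=rewrite | github.com/100jy/algorithm | 톱니바퀴.py | BFS
-- ===== SOURCE A (Python) =====
-- from collections import deque
--
-- def BFS(gear, query):
--     # DFS
--     # 시작 기어에서 양옆으로 이동하며
--     # 회전여부와 방향저장
--     # 4개 다보면 중단
--     q = deque([query])
--     visit = [False] * 4
--
--     visit[q[0][0]-1] = True
--     result = []
--     result.append(q[0])
--
--     while q:
--         num, d = q.popleft()
--         for dx in [-1, 1]:
--             if 1<=num+dx<=4:
--                 if not(visit[num+dx-1]) \
--                     and ((gear[num-1][6] !=
--                         gear[num+dx-1][2] and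
--                         dx == -1) or
--                     (gear[num - 1][2] !=
--                      gear[num + dx - 1][6] and
--                      dx == 1)):
--                     q.append((num+dx, -d))
--                     result.append((num+dx, -d))
--                     visit[num+dx-1] = True
--
--     return result
-- ===== SOURCE B (Python) =====
-- def _merge(left, right):
--     # interleave index-by-index (left[i], then right[i]); tail of the longer chain follows
--     if not left:
--         return right
--     if not right:
--         return left
--     return [left[0], right[0]] + _merge(left[1:], right[1:])
--
--
-- def BFS(gear, query):
--     num, d = query
--     # chain of gears that turn to the left of the start, signs alternating;
--     # walk while the left neighbour exists on the 1..4 board and the teeth differ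
--     left = []
--     cur, sign = num, d
--     while 1 <= cur - 1 <= 4 and gear[cur - 1][6] != gear[cur - 2][2]:
--         cur, sign = cur - 1, -sign
--         left.append((cur, sign))
--     # chain of gears that turn to the right of the start
--     right = []
--     cur, sign = num, d
--     while 1 <= cur + 1 <= 4 and gear[cur - 1][2] != gear[cur][6]:
--         cur, sign = cur + 1, -sign
--         right.append((cur, sign))
--     return [query] + _merge(left, right)
-- ===== Notes on version B (the rewrite author's own statement) =====
-- stated objective: simpler
-- what changed: Replaces the deque/visited-array BFS by two plain while-loops that walk the left and right gear chains with alternating signs, then interleaves the two chains index-by-index, which is exactly the BFS emission order.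
import Mathlib
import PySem

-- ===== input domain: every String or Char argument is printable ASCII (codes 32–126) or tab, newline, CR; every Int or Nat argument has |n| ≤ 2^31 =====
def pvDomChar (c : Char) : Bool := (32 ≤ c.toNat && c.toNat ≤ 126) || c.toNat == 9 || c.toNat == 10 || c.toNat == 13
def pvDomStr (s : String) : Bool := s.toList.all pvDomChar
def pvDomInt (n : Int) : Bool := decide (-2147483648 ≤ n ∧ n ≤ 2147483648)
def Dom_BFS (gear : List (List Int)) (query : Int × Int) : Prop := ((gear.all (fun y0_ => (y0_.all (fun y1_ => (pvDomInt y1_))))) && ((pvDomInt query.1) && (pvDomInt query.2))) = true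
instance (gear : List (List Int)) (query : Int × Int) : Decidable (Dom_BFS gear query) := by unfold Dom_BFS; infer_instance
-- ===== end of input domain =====

-- B replaces the deque/visited-array BFS by two direct while-loop walks (left chain, right chain,
-- signs alternating) interleaved index-by-index, which reproduces the BFS emission order; objective: simpler.


-- ===== PORT A =====
-- gear[i][j]; the defaults are never reached inside Pre_BFS (all accessed indices in range there)
def pvTooth (gear : List (List Int)) (i j : Int) : Int :=
  PySem.List.pyGetD (PySem.List.pyGetD gear i []) j 0

-- one 'dx' iteration of A's inner for-loop over state (q, visit, result)
def pvStepA (gear : List (List Int)) (num d dx : Int)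
    (st : List (Int × Int) × List Bool × List (Int × Int)) :
    List (Int × Int) × List Bool × List (Int × Int) :=
  let (q, visit, res) := st
  if 1 ≤ num + dx ∧ num + dx ≤ 4 then
    if ¬ (PySem.List.pyGetD visit (num + dx - 1) false = true) ∧
       ((pvTooth gear (num - 1) 6 ≠ pvTooth gear (num + dx - 1) 2 ∧ dx = -1) ∨
        (pvTooth gear (num - 1) 2 ≠ pvTooth gear (num + dx - 1) 6 ∧ dx = 1)) then
      (q ++ [(num + dx, -d)], PySem.List.pySetD visit (num + dx - 1) true, res ++ [(num + dx, -d)])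
    else st
  else st

-- A's while-loop; fuel 8: each enqueue marks a gear visited, so at most 4 elements ever
-- enter the queue inside Pre_BFS and 8 iterations always drain it
def pvLoopA (gear : List (List Int)) :
    Nat → List (Int × Int) → List Bool → List (Int × Int) → List (Int × Int)
  | 0, _, _, res => res
  | _ + 1, [], _, res => res
  | fuel + 1, (num, d) :: q, visit, res =>
    let st := pvStepA gear num d 1 (pvStepA gear num d (-1) (q, visit, res))
    pvLoopA gear fuel st.1 st.2.1 st.2.2

def BFS (gear : List (List Int)) (query : Int × Int) : List (Int × Int) :=
  pvLoopA gear 8 [query]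
    (PySem.List.pySetD [false, false, false, false] (query.1 - 1) true)
    [query]

-- ===== PORT B =====
-- Source B's left while-loop (walk while the left neighbour is on the 1..4 board and the
-- teeth differ); the loop decreases cur, so it runs at most (start-1) times: that count
-- is the structural recursion measure
def pvLeftWalk (gear : List (List Int)) : Nat → Int → Int → List (Int × Int)
  | 0, _, _ => []
  | steps + 1, cur, sign =>
    if (1 ≤ cur - 1 ∧ cur - 1 ≤ 4) ∧ pvTooth gear (cur - 1) 6 ≠ pvTooth gear (cur - 2) 2 then
      (cur - 1, -sign) :: pvLeftWalk gear steps (cur - 1) (-sign)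
    else []

-- Source B's right while-loop; runs at most (4-start) times (0 steps when the start is left of the board)
def pvRightWalk (gear : List (List Int)) : Nat → Int → Int → List (Int × Int)
  | 0, _, _ => []
  | steps + 1, cur, sign =>
    if (1 ≤ cur + 1 ∧ cur + 1 ≤ 4) ∧ pvTooth gear (cur - 1) 2 ≠ pvTooth gear cur 6 then
      (cur + 1, -sign) :: pvRightWalk gear steps (cur + 1) (-sign)
    else []

-- Source B's _merge: left[i] then right[i], the longer tail follows
def pvMerge : List (Int × Int) → List (Int × Int) → List (Int × Int)
  | [], right => right
  | l :: left, [] => l :: left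
  | l :: left, r :: right => l :: r :: pvMerge left right

def BFS_alt (gear : List (List Int)) (query : Int × Int) : List (Int × Int) :=
  query ::
    pvMerge (pvLeftWalk gear (query.1 - 1).toNat query.1 query.2)
            (pvRightWalk gear (4 - query.1).toNat query.1 query.2)

-- ===== PRECONDITION & SPEC =====
-- Pre_ admits on-board starts (1..4) with a well-formed gear table, and starts in -3..-1,
-- where A returns [query] without touching gear (no neighbour lies on the board).  It excludes
-- start gear 0 and starts outside -3..4 — there A raises IndexError or returns an accidental
-- value via negative-index wraparound of visit/gear, a corner no caller specifies — and, for
-- on-board starts, malformed gear tables (fewer than 4 rows or a row shorter than 7) on which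
-- A raises IndexError unless the propagation happens to stop early.
def Pre_BFS (gear : List (List Int)) (query : Int × Int) : Prop :=
  (-3 ≤ query.1 ∧ query.1 ≤ -1) ∨
  (1 ≤ query.1 ∧ query.1 ≤ 4 ∧ 4 ≤ gear.length ∧ ∀ row ∈ gear.take 4, 7 ≤ row.length)
instance (gear : List (List Int)) (query : Int × Int) : Decidable (Pre_BFS gear query) := by
  unfold Pre_BFS; infer_instance

def pvWitness_BFS : List (List Int) × (Int × Int) :=
  ([[0,1,0,1,0,1,0,1],[1,0,1,0,1,0,1,0],[0,0,0,0,0,0,0,0],[1,1,1,1,1,1,1,1]], (2, 1))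

def Spec_BFS (gear : List (List Int)) (query : Int × Int) (out : List (Int × Int)) : Prop := out = BFS_alt gear query
instance (gear : List (List Int)) (query : Int × Int) (out : List (Int × Int)) : Decidable (Spec_BFS gear query out) := by unfold Spec_BFS; infer_instance

-- ===== CLAIM (what is proved, stated in full; the proofs are below) =====
def Claim_equal_BFS : Prop := ∀ (gear : List (List Int)) (query : Int × Int), Dom_BFS gear query → Pre_BFS gear query → Spec_BFS gear query (BFS gear query)

-- ===== LEMMAS AND PROOFS =====

-- ===== VERDICT (by name: the statement is the Claim_ definition above) =====
theorem BFS_spec : Claim_equal_BFS := by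
  intro gear query _ hpre
  obtain ⟨num, d⟩ := query
  unfold Spec_BFS
  rcases hpre with ⟨h1, h2⟩ | ⟨h1, h2, -, -⟩
  · -- start gear in -3..-1: neither neighbour is on the board, both return [query]
    have h1' : (-3 : Int) ≤ num := h1
    have h2' : num ≤ (-1 : Int) := h2
    interval_cases num <;>
      simp [BFS, BFS_alt, pvLoopA, pvStepA, pvLeftWalk, pvRightWalk, pvMerge,
        PySem.List.pySetD, PySem.List.pySet?, PySem.List.pyIdx?, Int.reduceToNat]
  have h1' : (1 : Int) ≤ num := h1
  have h2' : num ≤ 4 := h2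
  interval_cases num
  · -- start gear 1: only the right chain exists
    by_cases hr1 : pvTooth gear 0 2 = pvTooth gear 1 6 <;>
      by_cases hr2 : pvTooth gear 1 2 = pvTooth gear 2 6 <;>
        by_cases hr3 : pvTooth gear 2 2 = pvTooth gear 3 6 <;>
          simp [BFS, BFS_alt, pvLoopA, pvStepA, pvLeftWalk, pvRightWalk, pvMerge,
      PySem.List.pySetD, PySem.List.pySet?, PySem.List.pyGetD, PySem.List.pyGet?,
      PySem.List.pyIdx?, Int.reduceToNat, hr1, hr2, hr3]
  · -- start gear 2
    by_cases hl1 : pvTooth gear 1 6 = pvTooth gear 0 2 <;>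
      by_cases hr1 : pvTooth gear 1 2 = pvTooth gear 2 6 <;>
        by_cases hr2 : pvTooth gear 2 2 = pvTooth gear 3 6 <;>
          simp [BFS, BFS_alt, pvLoopA, pvStepA, pvLeftWalk, pvRightWalk, pvMerge,
      PySem.List.pySetD, PySem.List.pySet?, PySem.List.pyGetD, PySem.List.pyGet?,
      PySem.List.pyIdx?, Int.reduceToNat, hl1, hr1, hr2]
  · -- start gear 3
    by_cases hl1 : pvTooth gear 2 6 = pvTooth gear 1 2 <;>
      by_cases hl2 : pvTooth gear 1 6 = pvTooth gear 0 2 <;>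
        by_cases hr1 : pvTooth gear 2 2 = pvTooth gear 3 6 <;>
          simp [BFS, BFS_alt, pvLoopA, pvStepA, pvLeftWalk, pvRightWalk, pvMerge,
      PySem.List.pySetD, PySem.List.pySet?, PySem.List.pyGetD, PySem.List.pyGet?,
      PySem.List.pyIdx?, Int.reduceToNat, hl1, hl2, hr1]
  · -- start gear 4: only the left chain exists
    by_cases hl1 : pvTooth gear 3 6 = pvTooth gear 2 2 <;>
      by_cases hl2 : pvTooth gear 2 6 = pvTooth gear 1 2 <;>
        by_cases hl3 : pvTooth gear 1 6 = pvTooth gear 0 2 <;>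
          simp [BFS, BFS_alt, pvLoopA, pvStepA, pvLeftWalk, pvRightWalk, pvMerge,
      PySem.List.pySetD, PySem.List.pySet?, PySem.List.pyGetD, PySem.List.pyGet?,
      PySem.List.pyIdx?, Int.reduceToNat, hl1, hl2, hl3]
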